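-- pv_equiv track=rewrite | github.com/S-Seipel/Impresora-Braille | logica_braille.py | render_braille_ascii
-- ===== SOURCE A (Python) =====
-- def render_braille_ascii(celdas):
--     fila1, fila2, fila3 = "", "", ""
--     for bits in celdas:
--         f1 = ("●" if bits[0] else "○") + " " + ("●" if bits[3] else "○")
--         f2 = ("●" if bits[1] else "○") + " " + ("●" if bits[4] else "○")
--         f3 = ("●" if bits[2] else "○") + " " + ("●" if bits[5] else "○")
--         fila1 += f1 + "   "
--         fila2 += f2 + "   "
--         fila3 += f3 + "   "
--     return fila1 + "\n" + fila2 + "\n" + fila3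
-- ===== SOURCE B (Python) =====
-- def render_braille_ascii(celdas):
--     def dot(b):
--         return "\u25cf" if b else "\u25cb"
--     lines = ["".join(dot(c[r]) + " " + dot(c[r + 3]) + "   " for c in celdas)
--              for r in (0, 1, 2)]
--     return "\n".join(lines)
-- ===== Notes on version B (the rewrite author's own statement) =====
-- stated objective: idiomatic
-- what changed: B transposes the iteration: instead of one pass over the cells accumulating three growing strings, it builds each of the three output rows independently with ''.join over the cells and joins the rows with '\n'.
import Mathlib
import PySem

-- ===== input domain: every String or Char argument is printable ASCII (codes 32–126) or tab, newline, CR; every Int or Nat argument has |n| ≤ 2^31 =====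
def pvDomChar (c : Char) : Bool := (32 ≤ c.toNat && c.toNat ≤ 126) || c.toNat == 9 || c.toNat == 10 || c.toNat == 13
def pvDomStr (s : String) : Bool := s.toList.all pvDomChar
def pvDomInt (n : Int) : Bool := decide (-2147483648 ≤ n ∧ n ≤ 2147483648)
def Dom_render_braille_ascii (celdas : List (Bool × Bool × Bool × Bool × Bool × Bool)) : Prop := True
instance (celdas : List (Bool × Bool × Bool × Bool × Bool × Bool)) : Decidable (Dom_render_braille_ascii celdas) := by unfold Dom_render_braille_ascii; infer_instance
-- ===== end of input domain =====

-- B builds the three output rows independently (one join per row over the cells) instead of A's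
-- single pass over the cells growing three accumulator strings. Objective: idiomatic.

-- ===== PORT A =====
-- one loop over celdas, three growing string accumulators, as in A
def render_braille_ascii (celdas : List (Bool × Bool × Bool × Bool × Bool × Bool)) : String :=
  let st := celdas.foldl
    (fun (acc : String × String × String) bits =>
      let f1 := (if bits.1 then "●" else "○") ++ " " ++ (if bits.2.2.2.1 then "●" else "○")
      let f2 := (if bits.2.1 then "●" else "○") ++ " " ++ (if bits.2.2.2.2.1 then "●" else "○")
      let f3 := (if bits.2.2.1 then "●" else "○") ++ " " ++ (if bits.2.2.2.2.2 then "●" else "○")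
      (acc.1 ++ f1 ++ "   ", acc.2.1 ++ f2 ++ "   ", acc.2.2 ++ f3 ++ "   "))
    ("", "", "")
  st.1 ++ "\n" ++ st.2.1 ++ "\n" ++ st.2.2

-- ===== PORT B =====
def pvDot (b : Bool) : String := if b then "●" else "○"

-- c[r] for a 6-tuple cell, r ∈ {0..5}
def pvBitAt (r : Nat) (c : Bool × Bool × Bool × Bool × Bool × Bool) : Bool :=
  match r with
  | 0 => c.1
  | 1 => c.2.1
  | 2 => c.2.2.1
  | 3 => c.2.2.2.1
  | 4 => c.2.2.2.2.1
  | _ => c.2.2.2.2.2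

def render_braille_ascii_alt (celdas : List (Bool × Bool × Bool × Bool × Bool × Bool)) : String :=
  let lines := [0, 1, 2].map (fun r =>
    PySem.Str.join "" (celdas.map (fun c =>
      pvDot (pvBitAt r c) ++ " " ++ pvDot (pvBitAt (r + 3) c) ++ "   ")))
  PySem.Str.join "\n" lines

-- ===== PRECONDITION & SPEC =====
def Spec_render_braille_ascii (celdas : List (Bool × Bool × Bool × Bool × Bool × Bool)) (out : String) : Prop := out = render_braille_ascii_alt celdas
instance (celdas : List (Bool × Bool × Bool × Bool × Bool × Bool)) (out : String) : Decidable (Spec_render_braille_ascii celdas out) := by unfold Spec_render_braille_ascii; infer_instance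

-- ===== CLAIM (what is proved, stated in full; the proofs are below) =====
def Claim_equal_render_braille_ascii : Prop := ∀ (celdas : List (Bool × Bool × Bool × Bool × Bool × Bool)), Dom_render_braille_ascii celdas → Spec_render_braille_ascii celdas (render_braille_ascii celdas)

-- ===== LEMMAS AND PROOFS =====

-- B's row r as a standalone function, for the induction
def pvLine (r : Nat) (celdas : List (Bool × Bool × Bool × Bool × Bool × Bool)) : String :=
  PySem.Str.join "" (celdas.map (fun c =>
    pvDot (pvBitAt r c) ++ " " ++ pvDot (pvBitAt (r + 3) c) ++ "   "))

theorem pvJoin_empty_cons (x : String) (xs : List String) :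
    PySem.Str.join "" (x :: xs) = x ++ PySem.Str.join "" xs := by
  apply String.toList_inj.mp
  cases xs with
  | nil => simp [PySem.Str.join, PySem.Chars.join_singleton, PySem.Chars.join_nil]
  | cons y ys => simp [PySem.Str.join, PySem.Chars.join_cons_cons]

theorem pvJoin_empty_nil : PySem.Str.join "" ([] : List String) = "" := by
  apply String.toList_inj.mp
  simp [PySem.Str.join, PySem.Chars.join_nil]

theorem pvJoin3 (a b c : String) :
    PySem.Str.join "\n" [a, b, c] = a ++ "\n" ++ b ++ "\n" ++ c := by
  apply String.toList_inj.mp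
  simp [PySem.Str.join, PySem.Chars.join_cons_cons, PySem.Chars.join_singleton,
    String.toList_append]

theorem pvLine_cons (r : Nat) (c : Bool × Bool × Bool × Bool × Bool × Bool)
    (cs : List (Bool × Bool × Bool × Bool × Bool × Bool)) :
    pvLine r (c :: cs)
      = pvDot (pvBitAt r c) ++ " " ++ pvDot (pvBitAt (r + 3) c) ++ "   " ++ pvLine r cs := by
  simp [pvLine, pvJoin_empty_cons, String.append_assoc]

theorem pvFold_eq (celdas : List (Bool × Bool × Bool × Bool × Bool × Bool)) :
    ∀ s1 s2 s3 : String,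
      celdas.foldl
        (fun (acc : String × String × String) bits =>
          let f1 := (if bits.1 then "●" else "○") ++ " " ++ (if bits.2.2.2.1 then "●" else "○")
          let f2 := (if bits.2.1 then "●" else "○") ++ " " ++ (if bits.2.2.2.2.1 then "●" else "○")
          let f3 := (if bits.2.2.1 then "●" else "○") ++ " " ++ (if bits.2.2.2.2.2 then "●" else "○")
          (acc.1 ++ f1 ++ "   ", acc.2.1 ++ f2 ++ "   ", acc.2.2 ++ f3 ++ "   "))
        (s1, s2, s3)
      = (s1 ++ pvLine 0 celdas, s2 ++ pvLine 1 celdas, s3 ++ pvLine 2 celdas) := by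
  induction celdas with
  | nil => intro s1 s2 s3; simp [pvLine, pvJoin_empty_nil]
  | cons c cs ih =>
      intro s1 s2 s3
      simp only [List.foldl_cons, ih, pvLine_cons]
      refine Prod.ext ?_ (Prod.ext ?_ ?_) <;>
        (simp [pvDot, pvBitAt, String.append_assoc]; try rfl)

-- ===== VERDICT (by name: the statement is the Claim_ definition above) =====
theorem render_braille_ascii_spec : Claim_equal_render_braille_ascii := by
  intro celdas _
  unfold Spec_render_braille_ascii render_braille_ascii render_braille_ascii_alt
  simp only [pvFold_eq celdas "" "" "", List.map_cons, List.map_nil]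
  show ("" ++ pvLine 0 celdas) ++ "\n" ++ ("" ++ pvLine 1 celdas) ++ "\n" ++ ("" ++ pvLine 2 celdas)
      = PySem.Str.join "\n" [pvLine 0 celdas, pvLine 1 celdas, pvLine 2 celdas]
  simp [pvJoin3]
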